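-- pv_equiv track=rewrite | github.com/mkotov/kosh | fractal_kosh.py | iterate_transforms
-- ===== SOURCE A (Python) =====
-- def compose(f, g):
--     return (f[0] * g[0] + f[1] * g[2], f[0] * g[1] + f[1] * g[3], f[2] * g[0] + f[3] * g[2], f[2] * g[1] + f[3] * g[3])
--
-- def iterate_transforms(ts, n):
--     if n == 0:
--         return [(1, 0, 0, 1)]
--     result = []
--     pts = iterate_transforms(ts, n - 1)
--     result += pts
--     for t in ts:
--         for pt in pts:
--             result.append(compose(t, pt))
--     return result
-- ===== SOURCE B (Python) =====
-- def compose(f, g):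
--     return (f[0] * g[0] + f[1] * g[2], f[0] * g[1] + f[1] * g[3], f[2] * g[0] + f[3] * g[2], f[2] * g[1] + f[3] * g[3])
--
-- def iterate_transforms(ts, n):
--     result = [(1, 0, 0, 1)]
--     for _ in range(n):
--         result = result + [compose(t, pt) for t in ts for pt in result]
--     return result
-- ===== Notes on version B (the rewrite author's own statement) =====
-- stated objective: simpler
-- what changed: Replaces the top-down recursion with a bottom-up iterative loop that grows the list level by level (result = result + [compose(t, pt) ...] n times), eliminating the recursive call and the explicit append loops.
-- outside the precondition, e.g. on iterate_transforms([], 950): A returns [(1, 0, 0, 1)], B returns [(1, 0, 0, 1)]; on iterate_transforms([(1, 0, 0, 1)], -1): A raises RecursionError, B returns [(1, 0, 0, 1)]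
import Mathlib
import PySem

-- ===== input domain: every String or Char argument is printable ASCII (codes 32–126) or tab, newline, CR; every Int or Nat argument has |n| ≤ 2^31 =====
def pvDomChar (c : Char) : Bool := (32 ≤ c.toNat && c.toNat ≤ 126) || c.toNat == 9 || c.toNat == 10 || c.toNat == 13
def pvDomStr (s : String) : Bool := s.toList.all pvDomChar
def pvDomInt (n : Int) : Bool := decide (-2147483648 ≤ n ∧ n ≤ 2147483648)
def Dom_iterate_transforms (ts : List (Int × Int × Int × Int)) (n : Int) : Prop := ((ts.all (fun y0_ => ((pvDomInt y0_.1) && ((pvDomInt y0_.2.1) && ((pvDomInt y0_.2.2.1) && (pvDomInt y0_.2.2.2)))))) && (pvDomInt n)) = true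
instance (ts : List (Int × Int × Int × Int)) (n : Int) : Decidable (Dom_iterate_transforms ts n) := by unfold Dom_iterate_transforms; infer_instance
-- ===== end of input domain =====

-- B replaces A's top-down recursion by a bottom-up iterative level-by-level build (objective: simpler).

-- ===== PORT A =====
def compose (f g : Int × Int × Int × Int) : Int × Int × Int × Int :=
  (f.1 * g.1 + f.2.1 * g.2.2.1, f.1 * g.2.1 + f.2.1 * g.2.2.2,
   f.2.2.1 * g.1 + f.2.2.2 * g.2.2.1, f.2.2.1 * g.2.1 + f.2.2.2 * g.2.2.2)

-- A's recursion on n; Python raises RecursionError for n < 0, which Pre_ excludes,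
-- so the recursion depth is n.toNat.
def iterateA (ts : List (Int × Int × Int × Int)) : Nat → List (Int × Int × Int × Int)
  | 0 => [(1, 0, 0, 1)]
  | k + 1 =>
    let result : List (Int × Int × Int × Int) := []
    let pts := iterateA ts k
    let result := result ++ pts
    ts.foldl (fun r t => pts.foldl (fun r2 pt => r2 ++ [compose t pt]) r) result

def iterate_transforms (ts : List (Int × Int × Int × Int)) (n : Int) : List (Int × Int × Int × Int) :=
  iterateA ts n.toNat

-- ===== PORT B =====
def iterate_transforms_alt (ts : List (Int × Int × Int × Int)) (n : Int) : List (Int × Int × Int × Int) :=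
  (PySem.List.pyRange 0 n 1).foldl
    (fun result _ => result ++ ts.flatMap (fun t => result.map (fun pt => compose t pt)))
    [(1, 0, 0, 1)]

-- ===== PRECONDITION & SPEC =====
-- Pre_ excludes n < 0 (A's recursion never reaches its base case: RecursionError) and n > 900,
-- where A's n+1-deep recursion can exceed CPython's recursion limit depending on ambient stack depth.
def Pre_iterate_transforms (ts : List (Int × Int × Int × Int)) (n : Int) : Prop := 0 ≤ n ∧ n ≤ 900
instance (ts : List (Int × Int × Int × Int)) (n : Int) : Decidable (Pre_iterate_transforms ts n) := by unfold Pre_iterate_transforms; infer_instance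
def pvWitness_iterate_transforms : (List (Int × Int × Int × Int)) × Int := ([(1, 0, 0, 1), (2, 1, 0, 1)], 2)

def Spec_iterate_transforms (ts : List (Int × Int × Int × Int)) (n : Int) (out : List (Int × Int × Int × Int)) : Prop := out = iterate_transforms_alt ts n
instance (ts : List (Int × Int × Int × Int)) (n : Int) (out : List (Int × Int × Int × Int)) : Decidable (Spec_iterate_transforms ts n out) := by unfold Spec_iterate_transforms; infer_instance

-- ===== CLAIM (what is proved, stated in full; the proofs are below) =====
def Claim_equal_iterate_transforms : Prop := ∀ (ts : List (Int × Int × Int × Int)) (n : Int), Dom_iterate_transforms ts n → Pre_iterate_transforms ts n → Spec_iterate_transforms ts n (iterate_transforms ts n)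

-- ===== LEMMAS AND PROOFS =====

-- one level of A's recursion is B's loop step
theorem iterateA_succ (ts : List (Int × Int × Int × Int)) (k : Nat) :
    iterateA ts (k + 1) =
      iterateA ts k ++ ts.flatMap (fun t => (iterateA ts k).map (fun pt => compose t pt)) := by
  show ts.foldl _ ([] ++ iterateA ts k) = _
  rw [List.nil_append]
  rw [show (fun (r : List (Int × Int × Int × Int)) (t : Int × Int × Int × Int) =>
        (iterateA ts k).foldl (fun r2 pt => r2 ++ [compose t pt]) r)
      = fun r t => r ++ (iterateA ts k).map (fun pt => compose t pt) from
    funext fun r => funext fun t => PySem.List.foldl_append_singleton_eq_map _ _ _]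
  exact PySem.List.foldl_append_eq_flatMap _ _ _

-- B's foldl over range(k) computes A's recursion
theorem alt_eq_iterateA (ts : List (Int × Int × Int × Int)) (k : Nat) :
    (PySem.List.pyRange 0 (k : Int) 1).foldl
      (fun result _ => result ++ ts.flatMap (fun t => result.map (fun pt => compose t pt)))
      [(1, 0, 0, 1)] = iterateA ts k := by
  induction k with
  | zero => simp [PySem.List.pyRange_zero_nat, iterateA]
  | succ k ih =>
    have h : PySem.List.pyRange 0 ((k : Int) + 1) 1
        = PySem.List.pyRange 0 (k : Int) 1 ++ [(k : Int)] :=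
      PySem.List.pyRange_one_succ_right (by exact_mod_cast Nat.zero_le k)
    push_cast
    rw [h, List.foldl_append, ih, iterateA_succ]
    rfl

-- ===== VERDICT (by name: the statement is the Claim_ definition above) =====
theorem iterate_transforms_spec : Claim_equal_iterate_transforms := by
  intro ts n _ hn
  obtain ⟨hn, -⟩ := hn
  show iterate_transforms ts n = iterate_transforms_alt ts n
  unfold iterate_transforms iterate_transforms_alt
  rw [← alt_eq_iterateA ts n.toNat, Int.toNat_of_nonneg hn]
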